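-- pv_equiv track=rewrite | github.com/Chaitanyabsprip/gcj-kata | saving_the_universe/python/save_the_universe/save_the_universe.py | count_min_switches
-- ===== SOURCE A (Python) =====
-- def should_switch(current_engine: str, query: str) -> bool:
--     return current_engine == query
--
-- def count_switches(engines: list[str],
--                    queries: list[str],
--                    switch_count: int = 0) -> int:
--     if len(engines) == 0 or len(queries) == 0:
--         return switch_count
--     if should_switch(engines[0], queries[0]):
--         switch_count += 1
--         engines = engines[1:]
--     return count_switches(engines, queries[1:], switch_count)
--
-- def count_min_switches(
--     engines: list[str],
--     queries: list[str],
--     switch_count: int,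
--     n: int,
-- ) -> int:
--     if n == 0:
--         return switch_count
--     switch_count_new = count_switches(engines, queries)
--     if switch_count > switch_count_new:
--         switch_count = switch_count_new
--     return count_min_switches(
--         engines[-1:] + engines[:-1],
--         queries,
--         switch_count,
--         n - 1,
--     )
-- ===== SOURCE B (Python) =====
-- def count_min_switches(engines, queries, switch_count, n):
--     result = switch_count
--     cur = list(engines)
--     for _ in range(n):
--         i = 0
--         cnt = 0
--         for q in queries:
--             if i >= len(cur):
--                 break
--             if cur[i] == q:
--                 i += 1
--                 cnt += 1
--         result = min(result, cnt)
--         cur = cur[-1:] + cur[:-1]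
--     return result
-- ===== Notes on version B (the rewrite author's own statement) =====
-- stated objective: faster
-- what changed: Replaced the two recursive helpers (which copy queries[1:] on every step) by one iterative fold: an inner loop over queries with an integer index pointer into the engine list, and an outer for-loop over range(n) that keeps the running minimum and rotates the list.
import Mathlib
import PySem

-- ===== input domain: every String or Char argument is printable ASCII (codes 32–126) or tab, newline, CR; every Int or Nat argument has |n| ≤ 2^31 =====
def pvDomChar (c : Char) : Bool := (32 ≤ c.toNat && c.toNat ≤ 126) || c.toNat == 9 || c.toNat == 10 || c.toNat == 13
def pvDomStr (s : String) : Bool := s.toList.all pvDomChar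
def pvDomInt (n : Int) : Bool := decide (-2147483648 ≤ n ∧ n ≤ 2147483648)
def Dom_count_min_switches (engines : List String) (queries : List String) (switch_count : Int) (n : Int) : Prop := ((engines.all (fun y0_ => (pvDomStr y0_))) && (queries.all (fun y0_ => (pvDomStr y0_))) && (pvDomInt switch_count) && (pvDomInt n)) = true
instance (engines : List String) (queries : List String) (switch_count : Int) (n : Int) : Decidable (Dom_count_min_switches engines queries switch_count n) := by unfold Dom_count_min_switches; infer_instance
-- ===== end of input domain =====

-- B replaces the two recursive, slice-heavy helpers by a single iterative fold keeping an
-- index pointer into the engine list (objective: faster — no queries[1:] copy per step).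

-- ===== PORT A =====
-- rotation engines[-1:] + engines[:-1], shared verbatim by both Python versions
def pvRot (xs : List String) : List String :=
  PySem.List.slice xs (some (-1)) none ++ PySem.List.slice xs none (some (-1))

-- A's count_switches, literal recursion (drop an engine and count on a match, always drop the query)
def pvCountSwitchesA : List String → List String → Int → Int
  | [], _, sc => sc
  | _ :: _, [], sc => sc
  | e :: es, q :: qs, sc =>
      if e = q then pvCountSwitchesA es qs (sc + 1)
      else pvCountSwitchesA (e :: es) qs sc
termination_by e q _ => q.length

-- A's recursion on n, made total with fuel n.toNat (Python diverges for n < 0; Pre_ excludes that)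
def pvCmsAuxA : Nat → List String → List String → Int → Int
  | 0, _, _, sc => sc
  | Nat.succ k, engines, queries, sc =>
      let scn := pvCountSwitchesA engines queries 0
      let sc' := if sc > scn then scn else sc
      pvCmsAuxA k (pvRot engines) queries sc'

def count_min_switches (engines : List String) (queries : List String) (switch_count : Int) (n : Int) : Int :=
  pvCmsAuxA n.toNat engines queries switch_count

-- ===== PORT B =====
-- B's inner loop: one pass over queries keeping (index into cur, match count)
def pvScanB (cur : List String) (queries : List String) : Int :=
  (queries.foldl
      (fun (p : Nat × Int) q =>
        if cur.length ≤ p.1 then p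
        else if cur[p.1]? = some q then (p.1 + 1, p.2 + 1) else p)
      (0, 0)).2

def count_min_switches_alt (engines : List String) (queries : List String) (switch_count : Int) (n : Int) : Int :=
  ((PySem.List.pyRange 0 n 1).foldl
      (fun (p : List String × Int) _ => (pvRot p.1, min p.2 (pvScanB p.1 queries)))
      (engines, switch_count)).2

-- ===== PRECONDITION & SPEC =====
-- Pre_ excludes n < 0, on which Python A recurses forever (RecursionError); A returns on all other inputs.
def Pre_count_min_switches (engines : List String) (queries : List String) (switch_count : Int) (n : Int) : Prop := 0 ≤ n
instance (engines : List String) (queries : List String) (switch_count : Int) (n : Int) : Decidable (Pre_count_min_switches engines queries switch_count n) := by unfold Pre_count_min_switches; infer_instance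
def pvWitness_count_min_switches : List String × List String × Int × Int := (["a", "b"], ["b", "a", "b"], 5, 2)

def Spec_count_min_switches (engines : List String) (queries : List String) (switch_count : Int) (n : Int) (out : Int) : Prop := out = count_min_switches_alt engines queries switch_count n
instance (engines : List String) (queries : List String) (switch_count : Int) (n : Int) (out : Int) : Decidable (Spec_count_min_switches engines queries switch_count n out) := by unfold Spec_count_min_switches; infer_instance

-- ===== CLAIM (what is proved, stated in full; the proofs are below) =====
def Claim_equal_count_min_switches : Prop := ∀ (engines : List String) (queries : List String) (switch_count : Int) (n : Int), Dom_count_min_switches engines queries switch_count n → Pre_count_min_switches engines queries switch_count n → Spec_count_min_switches engines queries switch_count n (count_min_switches engines queries switch_count n)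

-- ===== LEMMAS AND PROOFS =====

-- the accumulator of A's count_switches is additive
theorem csA_add : ∀ (qs es : List String) (sc : Int),
    pvCountSwitchesA es qs sc = sc + pvCountSwitchesA es qs 0 := by
  intro qs
  induction qs with
  | nil => intro es sc; cases es <;> simp [pvCountSwitchesA]
  | cons q qs ih =>
      intro es sc
      cases es with
      | nil => simp [pvCountSwitchesA]
      | cons e es =>
          by_cases h : e = q
          · simp only [pvCountSwitchesA, if_pos h]
            rw [ih es (sc + 1), ih es (0 + 1)]; ring
          · simp only [pvCountSwitchesA, if_neg h]
            exact ih (e :: es) sc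

-- B's index-pointer fold computes A's count_switches on the remaining suffix
theorem scanB_inv : ∀ (qs : List String) (cur : List String) (i : Nat) (c : Int),
    (qs.foldl
        (fun (p : Nat × Int) q =>
          if cur.length ≤ p.1 then p
          else if cur[p.1]? = some q then (p.1 + 1, p.2 + 1) else p)
        (i, c)).2 = c + pvCountSwitchesA (cur.drop i) qs 0 := by
  intro qs
  induction qs with
  | nil =>
      intro cur i c
      rcases h : cur.drop i with _ | ⟨x, xs⟩ <;> simp [pvCountSwitchesA]
  | cons q qs ih =>
      intro cur i c
      simp only [List.foldl_cons]
      by_cases hlen : cur.length ≤ i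
      · rw [if_pos hlen, ih]
        rw [List.drop_eq_nil_of_le hlen]
        simp [pvCountSwitchesA]
      · push_neg at hlen
        rw [if_neg (by omega)]
        have hdrop : cur.drop i = cur[i] :: cur.drop (i + 1) :=
          List.drop_eq_getElem_cons hlen
        have hget : cur[i]? = some cur[i] := List.getElem?_eq_getElem hlen
        by_cases he : cur[i] = q
        · rw [if_pos (by rw [hget, he])]
          rw [ih, hdrop]
          simp only [pvCountSwitchesA, if_pos he]
          rw [csA_add qs (cur.drop (i + 1)) (0 + 1)]
          ring
        · rw [if_neg (by rw [hget]; simpa using he)]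
          rw [ih, hdrop]
          simp only [pvCountSwitchesA, if_neg he]

theorem scanB_eq_csA (cur qs : List String) :
    pvScanB cur qs = pvCountSwitchesA cur qs 0 := by
  unfold pvScanB
  rw [scanB_inv qs cur 0 0]
  simp

-- the outer fold ignores the loop variable: it only depends on the list's length
theorem foldl_eq_aux (queries : List String) : ∀ (l : List Int) (engines : List String) (sc : Int),
    (l.foldl (fun (p : List String × Int) _ => (pvRot p.1, min p.2 (pvScanB p.1 queries)))
        (engines, sc)).2 = pvCmsAuxA l.length engines queries sc := by
  intro l
  induction l with
  | nil => intro engines sc; simp [pvCmsAuxA]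
  | cons a l ih =>
      intro engines sc
      simp only [List.foldl_cons, List.length_cons]
      rw [ih]
      show _ = pvCmsAuxA (Nat.succ l.length) engines queries sc
      simp only [pvCmsAuxA]
      congr 1
      rw [scanB_eq_csA]
      rcases lt_or_ge (pvCountSwitchesA engines queries 0) sc with h | h
      · rw [if_pos (by omega), min_eq_right (by omega)]
      · rw [if_neg (by omega), min_eq_left (by omega)]

-- ===== VERDICT (by name: the statement is the Claim_ definition above) =====
theorem count_min_switches_spec : Claim_equal_count_min_switches := by
  intro engines queries switch_count n _ hpre
  unfold Spec_count_min_switches count_min_switches count_min_switches_alt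
  rw [foldl_eq_aux queries, PySem.List.length_pyRange_one]
  norm_num
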